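-- pv_equiv track=rewrite | github.com/ColdTbrew/baekjoon_solved | 백준/Silver/17615. 볼 모으기/볼 모으기.py | count_moves_to_side
-- ===== SOURCE A (Python) =====
-- def count_moves_to_side(balls, target_color, direction):
--     n = len(balls)
--     move_count = 0
--     start_index = -1
--
--     if direction == 'left':
--         # 왼쪽으로 모으는 경우, 오른쪽 끝에서부터 탐색
--         i = n - 1
--         # 가장 오른쪽 끝에 있는 target_color 볼 무더기는 옮길 필요 없음
--         while i >= 0 and balls[i] == target_color:
--             i -= 1
--         start_index = i
--
--         # 나머지 볼 중 target_color 볼의 개수 세기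
--         for j in range(start_index, -1, -1):
--             if balls[j] == target_color:
--                 move_count += 1
--
--     elif direction == 'right':
--         # 오른쪽으로 모으는 경우, 왼쪽 끝에서부터 탐색
--         i = 0
--         # 가장 왼쪽 끝에 있는 target_color 볼 무더기는 옮길 필요 없음
--         while i < n and balls[i] == target_color:
--             i += 1
--         start_index = i
--
--         # 나머지 볼 중 target_color 볼의 개수 세기
--         for j in range(start_index, n):
--             if balls[j] == target_color:
--                 move_count += 1
--
--     return move_count
-- ===== SOURCE B (Python) =====
-- def count_moves_to_side(balls, target_color, direction):
--     # total target balls minus the contiguous run already sitting at the destination side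
--     if direction == 'left':
--         ordered = reversed(balls)
--     elif direction == 'right':
--         ordered = balls
--     else:
--         return 0
--     kept = 0
--     for b in ordered:
--         if b != target_color:
--             break
--         kept += 1
--     return balls.count(target_color) - kept
-- ===== Notes on version B (the rewrite author's own statement) =====
-- stated objective: simpler
-- what changed: Replaces A's skip-the-destination-run-then-count-the-remainder index scans with the closed formulation total count of target_color minus the length of the contiguous destination-side run.
import Mathlib
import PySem

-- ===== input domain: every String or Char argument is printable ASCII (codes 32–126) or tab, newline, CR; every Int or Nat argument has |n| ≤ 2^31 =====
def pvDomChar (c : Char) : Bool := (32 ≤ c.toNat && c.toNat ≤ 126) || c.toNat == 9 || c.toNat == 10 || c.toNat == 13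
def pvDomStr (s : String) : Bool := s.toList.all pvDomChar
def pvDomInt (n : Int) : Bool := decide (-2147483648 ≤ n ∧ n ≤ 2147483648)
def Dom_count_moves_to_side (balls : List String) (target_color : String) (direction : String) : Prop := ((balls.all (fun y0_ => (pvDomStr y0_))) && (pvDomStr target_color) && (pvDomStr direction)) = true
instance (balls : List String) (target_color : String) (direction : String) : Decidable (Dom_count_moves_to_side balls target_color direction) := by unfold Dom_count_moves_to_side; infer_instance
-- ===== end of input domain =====

-- B replaces A's skip-the-destination-run-then-count-the-remainder scans by the simpler
-- closed formulation: total count of target_color minus the destination-side run length.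

-- ===== PORT A =====
-- 'i = n - 1; while i >= 0 and balls[i] == target_color: i -= 1' (argument m = i + 1; result = final i)
-- pyGetD with default "" is exact here: the loop only reads indices 0 ≤ k < len(balls).
def pvSkipL (balls : List String) (t : String) : Nat → Int
  | 0 => -1
  | k + 1 => if PySem.List.pyGetD balls (k : Int) "" == t then pvSkipL balls t k else (k : Int)

-- 'i = 0; while i < n and balls[i] == target_color: i += 1'
def pvSkipR (balls : List String) (t : String) (i : Nat) : Nat :=
  if h : i < balls.length then
    if balls[i] == t then pvSkipR balls t (i + 1) else i
  else i
termination_by balls.length - i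

def count_moves_to_side (balls : List String) (target_color : String) (direction : String) : Int :=
  let n : Int := PySem.List.len balls
  if direction == "left" then
    let start : Int := pvSkipL balls target_color balls.length
    (PySem.List.pyRange start (-1) (-1)).foldl
      (fun acc j => if PySem.List.pyGetD balls j "" == target_color then acc + 1 else acc) 0
  else if direction == "right" then
    let start : Int := (pvSkipR balls target_color 0 : Int)
    (PySem.List.pyRange start n 1).foldl
      (fun acc j => if PySem.List.pyGetD balls j "" == target_color then acc + 1 else acc) 0
  else 0

-- ===== PORT B =====
-- 'kept': length of the leading run of target_color ('for b in ordered: if b != t: break; kept += 1')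
def pvRun (t : String) : List String → Nat
  | [] => 0
  | b :: bs => if b == t then pvRun t bs + 1 else 0

def count_moves_to_side_alt (balls : List String) (target_color : String) (direction : String) : Int :=
  if direction == "left" then
    (balls.count target_color : Int) - (pvRun target_color balls.reverse : Int)
  else if direction == "right" then
    (balls.count target_color : Int) - (pvRun target_color balls : Int)
  else 0

-- ===== PRECONDITION & SPEC =====
def Spec_count_moves_to_side (balls : List String) (target_color : String) (direction : String) (out : Int) : Prop := out = count_moves_to_side_alt balls target_color direction
instance (balls : List String) (target_color : String) (direction : String) (out : Int) : Decidable (Spec_count_moves_to_side balls target_color direction out) := by unfold Spec_count_moves_to_side; infer_instance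

-- ===== CLAIM (what is proved, stated in full; the proofs are below) =====
def Claim_equal_count_moves_to_side : Prop := ∀ (balls : List String) (target_color : String) (direction : String), Dom_count_moves_to_side balls target_color direction → Spec_count_moves_to_side balls target_color direction (count_moves_to_side balls target_color direction)

-- ===== LEMMAS AND PROOFS =====

theorem pvRun_le_length (t : String) (xs : List String) : pvRun t xs ≤ xs.length := by
  induction xs with
  | nil => simp [pvRun]
  | cons b bs ih => simp only [pvRun, List.length_cons]; split <;> omega

theorem count_eq_run_add_count_drop (t : String) (xs : List String) :
    xs.count t = pvRun t xs + (xs.drop (pvRun t xs)).count t := by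
  induction xs with
  | nil => simp [pvRun]
  | cons b bs ih =>
    by_cases h : b == t
    · simp [pvRun, eq_of_beq h, ih]; omega
    · simp [pvRun, h]

theorem pvSkipR_eq (balls : List String) (t : String) (i : Nat) :
    pvSkipR balls t i = i + pvRun t (balls.drop i) := by
  unfold pvSkipR
  split
  · rename_i h
    rw [List.drop_eq_getElem_cons h]
    by_cases hb : balls[i] == t
    · rw [if_pos hb, pvSkipR_eq balls t (i + 1)]
      simp [pvRun, hb]; omega
    · simp [hb, pvRun]
  · rename_i h
    rw [List.drop_eq_nil_of_le (by omega)]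
    simp [pvRun]
termination_by balls.length - i

theorem pvSkipL_eq (balls : List String) (t : String) (m : Nat) (hm : m ≤ balls.length) :
    pvSkipL balls t m = (m : Int) - 1 - (pvRun t (balls.take m).reverse : Int) := by
  induction m with
  | zero => simp [pvSkipL, pvRun]
  | succ k ih =>
    have hk : k < balls.length := by omega
    have hget : PySem.List.pyGetD balls (k : Int) "" = balls[k] := by
      rw [PySem.List.pyGetD_natCast]
      simp [List.getD, List.getElem?_eq_getElem hk]
    have htake : (balls.take (k + 1)).reverse = balls[k] :: (balls.take k).reverse := by
      rw [List.take_add_one, List.getElem?_eq_getElem hk]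
      simp
    simp only [pvSkipL, hget, htake]
    by_cases hb : balls[k] == t
    · rw [if_pos hb, ih (by omega)]
      simp [pvRun, hb]; ring
    · simp [hb, pvRun]

theorem countP_range_eq_count_take (balls : List String) (t : String) (m : Nat)
    (hm : m ≤ balls.length) :
    (List.range m).countP (fun k : Nat => PySem.List.pyGetD balls (k : Int) "" == t)
      = (balls.take m).count t := by
  induction m with
  | zero => simp
  | succ k ih =>
    have hk : k < balls.length := by omega
    rw [List.range_succ, List.countP_append, ih (by omega),
        List.take_add_one, List.getElem?_eq_getElem hk]
    have hget : PySem.List.pyGetD balls (k : Int) "" = balls[k] := by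
      rw [PySem.List.pyGetD_natCast]
      simp [List.getD, List.getElem?_eq_getElem hk]
    simp only [List.countP_cons, List.countP_nil, hget, Option.toList_some,
      List.count_append, List.count_cons, List.count_nil, beq_iff_eq]

theorem count_moves_to_side_spec : Claim_equal_count_moves_to_side := by
  intro balls t dir _
  unfold Spec_count_moves_to_side count_moves_to_side count_moves_to_side_alt
  by_cases hl : dir == "left"
  · -- left: start = n - 1 - r where r is the trailing run
    simp only [hl, if_pos]
    set r : Nat := pvRun t balls.reverse with hr
    have hrle : r ≤ balls.length := by
      have := pvRun_le_length t balls.reverse; simpa using this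
    have hstart : pvSkipL balls t balls.length = ((balls.length - r : Nat) : Int) - 1 := by
      rw [pvSkipL_eq balls t balls.length le_rfl]
      simp [← hr]
      push_cast [Nat.cast_sub hrle]; ring
    rw [hstart]
    rw [PySem.List.foldl_if_add_one]
    rw [PySem.List.pyRange_neg_one_eq_reverse]
    rw [List.countP_reverse]
    have : ((balls.length - r : Nat) : Int) - 1 + 1 = ((balls.length - r : Nat) : Int) := by ring
    rw [this]
    rw [show (-1 : Int) + 1 = 0 by ring]
    rw [PySem.List.pyRange_zero_nat]
    rw [List.countP_map]
    have hcnt : (List.range (balls.length - r)).countP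
        ((fun j => PySem.List.pyGetD balls j "" == t) ∘ (fun k : Nat => (k : Int)))
        = (balls.take (balls.length - r)).count t := by
      rw [← countP_range_eq_count_take balls t (balls.length - r) (by omega)]
      rfl
    rw [hcnt]
    have htake : (balls.reverse.drop r).reverse = balls.take (balls.length - r) := by
      rw [List.reverse_drop]; simp
    have hc2 : (balls.take (balls.length - r)).count t = (balls.reverse.drop r).count t := by
      rw [← htake, List.count_reverse]
    have hsplit := count_eq_run_add_count_drop t balls.reverse
    rw [List.count_reverse, ← hr] at hsplit
    omega
  · by_cases hrt : dir == "right"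
    · simp only [hl, hrt, if_neg, if_pos, Bool.false_eq_true, not_false_iff]
      set r : Nat := pvRun t balls with hr
      have hrle : r ≤ balls.length := pvRun_le_length t balls
      have hstart : pvSkipR balls t 0 = r := by
        rw [pvSkipR_eq]; simp [← hr]
      rw [hstart]
      rw [PySem.List.foldl_if_add_one]
      have hmap := PySem.List.map_pyGetD_pyRange (xs := balls) (a := (r : Int)) (d := "")
        (by positivity)
      have hcnt : (PySem.List.pyRange (r : Int) (PySem.List.len balls) 1).countP
          (fun j => PySem.List.pyGetD balls j "" == t) = (balls.drop r).count t := by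
        calc (PySem.List.pyRange (r : Int) (PySem.List.len balls) 1).countP
              (fun j => PySem.List.pyGetD balls j "" == t)
            = ((PySem.List.pyRange (r : Int) (PySem.List.len balls) 1).map
                (fun j => PySem.List.pyGetD balls j "")).countP (· == t) := by
              rw [List.countP_map]; rfl
          _ = (balls.drop ((r : Int)).toNat).countP (· == t) := by rw [hmap]
          _ = (balls.drop r).count t := by simp [List.count]
      rw [hcnt]
      have hsplit := count_eq_run_add_count_drop t balls
      rw [← hr] at hsplit
      omega
    · simp [hl, hrt]
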